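-- pv_equiv track=rewrite | github.com/brianptriana/DRG_grouper | drg_grouper/parser/appendix_b.py | expand_drg_range
-- ===== SOURCE A (Python) =====
-- def expand_drg_range(drg_range: str) -> list[str]:
--     """
--     Expand a DRG range like '371-373' into ['371', '372', '373'].
--     Also handles comma-separated values like '371,373'.
--     """
--     drgs = []
--
--     # Handle comma-separated ranges
--     parts = drg_range.replace(' ', '').split(',')
--
--     for part in parts:
--         if '-' in part:
--             # Range like 371-373
--             start, end = part.split('-', 1)
--             try:
--                 start_num = int(start)
--                 end_num = int(end)
--                 for i in range(start_num, end_num + 1):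
--                     drgs.append(str(i).zfill(3))
--             except ValueError:
--                 drgs.append(part)
--         else:
--             # Single DRG
--             try:
--                 drgs.append(str(int(part)).zfill(3))
--             except ValueError:
--                 if part:
--                     drgs.append(part)
--
--     return drgs
-- ===== SOURCE B (Python) =====
-- def expand_drg_range(drg_range: str) -> list[str]:
--     """
--     Expand a DRG range like '371-373' into ['371', '372', '373'].
--     Also handles comma-separated values like '371,373'.
--     """
--     def go(s: str) -> list[str]:
--         part, sep, rest = s.partition(',')
--         lo, dash, hi = part.partition('-')
--         if not dash:
--             hi = lo
--         try:
--             out = [str(n).zfill(3) for n in range(int(lo), int(hi) + 1)]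
--         except ValueError:
--             out = [part] if part else []
--         return out + (go(rest) if sep else [])
--     return go(drg_range.replace(' ', ''))
-- ===== Notes on version B (the rewrite author's own statement) =====
-- stated objective: simpler
-- what changed: B is a recursive descent over the string: str.partition at the comma peels one segment per recursive call and str.partition at the dash splits that segment, with one unified try for singles and degenerate ranges, replacing A's split-into-a-list accumulator loop with its separate dash branch and duplicated try/except.
import Mathlib
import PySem

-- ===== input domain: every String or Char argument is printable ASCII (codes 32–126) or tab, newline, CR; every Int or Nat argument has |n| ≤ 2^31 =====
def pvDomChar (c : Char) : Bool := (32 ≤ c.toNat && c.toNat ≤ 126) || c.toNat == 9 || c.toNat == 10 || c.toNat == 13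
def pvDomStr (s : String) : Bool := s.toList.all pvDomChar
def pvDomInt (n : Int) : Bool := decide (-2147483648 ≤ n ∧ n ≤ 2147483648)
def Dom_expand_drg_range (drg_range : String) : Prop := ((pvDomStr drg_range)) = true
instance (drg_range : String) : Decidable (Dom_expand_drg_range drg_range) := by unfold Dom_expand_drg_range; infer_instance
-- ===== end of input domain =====

-- B replaces A's split-into-a-list accumulator loop (with its separate dash branch and duplicated
-- try/except) by a recursive descent: partition at the comma peels one segment per call, partition
-- at the dash splits it, one unified try handles singles and ranges; same output, simpler decomposition (not faster).

-- ===== PORT A =====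
-- literal transliteration of A: accumulator loop over comma-split parts, separate '-' branch.
def expand_drg_range (drg_range : String) : List String :=
  let parts := (PySem.Str.split? (PySem.Str.replace drg_range " " "") ",").getD []
  parts.foldl (fun drgs part =>
    if PySem.Str.isIn "-" part then
      match (PySem.Str.splitMax? part "-" 1).getD [] with
      | [start, stop] =>
        match PySem.Int.ofStr? start, PySem.Int.ofStr? stop with
        | some s, some e =>
            drgs ++ (PySem.List.pyRange s (e + 1) 1).map
              (fun i => PySem.Str.zfill (PySem.Int.toStr i) 3)
        | _, _ => drgs ++ [part]
      | _ => drgs  -- unreachable: split('-',1) of a part containing '-' has exactly two pieces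
    else
      match PySem.Int.ofStr? part with
      | some n => drgs ++ [PySem.Str.zfill (PySem.Int.toStr n) 3]
      | none => if part ≠ "" then drgs ++ [part] else drgs) []

-- ===== PORT B =====
-- str.partition(d) for a one-char separator, ported by hand as the obvious scan (exact):
-- returns (piece before the first d, whether d occurs, piece after it).
def pvPart (d : Char) : List Char → List Char × Bool × List Char
  | [] => ([], false, [])
  | c :: rest =>
    if c = d then ([], true, rest)
    else
      let r := pvPart d rest
      (c :: r.1, r.2.1, r.2.2)

-- termination of pvGo: the remainder after a found separator is strictly shorter
theorem pvPart_rest_lt (d : Char) (l : List Char) (h : (pvPart d l).2.1 = true) :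
    (pvPart d l).2.2.length < l.length := by
  induction l with
  | nil => simp [pvPart] at h
  | cons c rest ih =>
    by_cases hc : c = d
    · simp [pvPart, hc]
    · simp only [pvPart, if_neg hc] at h ⊢
      exact Nat.lt_succ_of_lt (ih h)

-- B's inner go(s): one segment (partition at ','), expand it (partition at '-'), recurse on the rest.
def pvGo (s : List Char) : List String :=
  let t := pvPart ',' s                -- part, sep, rest = s.partition(',')
  let u := pvPart '-' t.1              -- lo, dash, hi = part.partition('-')
  let lo := u.1
  let hi := if u.2.1 then u.2.2 else lo  -- if not dash: hi = lo
  -- try: the zfill'd range; except ValueError (either int() fails): the raw part, if nonempty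
  let out := ((PySem.Int.ofChars? lo).bind (fun a => (PySem.Int.ofChars? hi).map (fun b =>
      (PySem.List.pyRange a (b + 1) 1).map
        (fun n => PySem.Str.zfill (PySem.Int.toStr n) 3)))).getD
    (if t.1.isEmpty then [] else [String.ofList t.1])
  out ++ (if h : t.2.1 = true then pvGo t.2.2 else [])
termination_by s.length
decreasing_by exact pvPart_rest_lt ',' s h

def expand_drg_range_alt (drg_range : String) : List String :=
  pvGo (PySem.Str.replace drg_range " " "").toList

-- ===== PRECONDITION & SPEC =====
def Spec_expand_drg_range (drg_range : String) (out : List String) : Prop := out = expand_drg_range_alt drg_range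
instance (drg_range : String) (out : List String) : Decidable (Spec_expand_drg_range drg_range out) := by unfold Spec_expand_drg_range; infer_instance

-- ===== CLAIM (what is proved, stated in full; the proofs are below) =====
def Claim_equal_expand_drg_range : Prop := ∀ (drg_range : String), Dom_expand_drg_range drg_range → Spec_expand_drg_range drg_range (expand_drg_range drg_range)

-- ===== LEMMAS AND PROOFS =====

-- first occurrence of d in l: none, or the pieces before and after it
def pvSplitFirst (d : Char) : List Char → Option (List Char × List Char)
  | [] => none
  | c :: rest => if c = d then some ([], rest) else (pvSplitFirst d rest).map (fun p => (c :: p.1, p.2))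

theorem pvSplitFirst_eq_none_iff (d : Char) (l : List Char) :
    pvSplitFirst d l = none ↔ d ∉ l := by
  induction l with
  | nil => simp [pvSplitFirst]
  | cons c rest ih =>
    by_cases h : c = d
    · simp [pvSplitFirst, h]
    · simp [pvSplitFirst, h, ih, Option.map_eq_none_iff]
      tauto

theorem pvSplitFirst_shape (d : Char) (l p q : List Char)
    (h : pvSplitFirst d l = some (p, q)) : l = p ++ d :: q := by
  induction l generalizing p q with
  | nil => simp [pvSplitFirst] at h
  | cons c rest ih =>
    by_cases hc : c = d
    · rw [pvSplitFirst, if_pos hc] at h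
      obtain ⟨h1, h2⟩ := Prod.mk_inj.mp (Option.some_inj.mp h)
      simp [hc, ← h1, ← h2]
    · rw [pvSplitFirst, if_neg hc] at h
      obtain ⟨⟨a, b⟩, hab, hf⟩ := Option.map_eq_some_iff.mp h
      obtain ⟨h1, h2⟩ := Prod.mk_inj.mp hf
      subst h1 h2
      simp [ih _ _ hab]

-- pvPart in terms of pvSplitFirst
theorem pvPart_eq (d : Char) (l : List Char) :
    pvPart d l = match pvSplitFirst d l with
                 | none => (l, false, [])
                 | some (p, q) => (p, true, q) := by
  induction l with
  | nil => simp [pvPart, pvSplitFirst]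
  | cons c rest ih =>
    by_cases hc : c = d
    · simp [pvPart, pvSplitFirst, hc]
    · simp only [pvPart, pvSplitFirst, if_neg hc, ih]
      cases h : pvSplitFirst d rest with
      | none => simp
      | some pq => simp

-- B's per-segment expansion, as a function (pvGo's body computes exactly this per segment)
def pvEmit (cs : List Char) : List String :=
  let u := pvPart '-' cs
  let lo := u.1
  let hi := if u.2.1 then u.2.2 else lo
  ((PySem.Int.ofChars? lo).bind (fun a => (PySem.Int.ofChars? hi).map (fun b =>
      (PySem.List.pyRange a (b + 1) 1).map
        (fun n => PySem.Str.zfill (PySem.Int.toStr n) 3)))).getD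
    (if cs.isEmpty then [] else [String.ofList cs])

-- the comma segments of s, by the same recursion as pvGo
def pvSplit (d : Char) (s : List Char) : List (List Char) :=
  let t := pvPart d s
  if h : t.2.1 = true then t.1 :: pvSplit d t.2.2 else [t.1]
termination_by s.length
decreasing_by exact pvPart_rest_lt d s h

theorem pvGo_eq_flatMap (s : List Char) :
    pvGo s = (pvSplit ',' s).flatMap pvEmit := by
  rw [pvGo, pvSplit]
  by_cases h : (pvPart ',' s).2.1 = true
  · rw [dif_pos h, dif_pos h, List.flatMap_cons, ← pvGo_eq_flatMap]
    rfl
  · rw [dif_neg h, dif_neg h]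
    simp [pvEmit]
termination_by s.length
decreasing_by exact pvPart_rest_lt ',' s h

def pvMapHead (f : List Char → List Char) : List (List Char) → List (List Char)
  | [] => []
  | x :: xs => f x :: xs

theorem pvSplit_nil (d : Char) : pvSplit d [] = [[]] := by
  rw [pvSplit]; simp [pvPart]

theorem pvSplit_cons_eq (d : Char) (rest : List Char) :
    pvSplit d (d :: rest) = [] :: pvSplit d rest := by
  rw [pvSplit]; simp [pvPart]

theorem pvSplit_cons_ne (d c : Char) (rest : List Char) (hc : c ≠ d) :
    pvSplit d (c :: rest) = pvMapHead (fun x => c :: x) (pvSplit d rest) := by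
  conv_lhs => rw [pvSplit]
  conv_rhs => rw [pvSplit]
  simp only [pvPart, if_neg hc]
  by_cases h : (pvPart d rest).2.1 = true
  · rw [dif_pos h, dif_pos h]; simp [pvMapHead]
  · rw [dif_neg h, dif_neg h]; simp [pvMapHead]

theorem pvSplit_ne_nil (d : Char) (s : List Char) : pvSplit d s ≠ [] := by
  rw [pvSplit]
  by_cases h : (pvPart d s).2.1 = true
  · rw [dif_pos h]; simp
  · rw [dif_neg h]; simp

-- splitOn.go for a one-char separator computes pvSplit, with cur prefixed onto the first piece
theorem pv_go_split (d : Char) (fuel : Nat) (l cur : List Char) (acc : List (List Char))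
    (hf : l.length < fuel) :
    PySem.Chars.splitOn.go [d] fuel l cur acc =
      acc.reverse ++ pvMapHead (fun x => cur.reverse ++ x) (pvSplit d l) := by
  induction fuel generalizing l cur acc with
  | zero => omega
  | succ n ih =>
    cases l with
    | nil => simp [PySem.Chars.splitOn.go, pvSplit_nil, pvMapHead]
    | cons c rest =>
      by_cases hc : c = d
      · subst hc
        rw [show PySem.Chars.splitOn.go [c] (n+1) (c :: rest) cur acc
              = PySem.Chars.splitOn.go [c] n (List.drop 1 (c :: rest)) [] (cur.reverse :: acc) by
            simp [PySem.Chars.splitOn.go, List.isPrefixOf]]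
        rw [ih _ _ _ (by simp at hf ⊢; omega)]
        rw [pvSplit_cons_eq]
        cases h : pvSplit c rest with
        | nil => exact absurd h (pvSplit_ne_nil c rest)
        | cons x xs => simp [pvMapHead, h]
      · have hc' : ¬ d = c := fun h => hc h.symm
        rw [show PySem.Chars.splitOn.go [d] (n+1) (c :: rest) cur acc
              = PySem.Chars.splitOn.go [d] n rest (c :: cur) acc by
            simp [PySem.Chars.splitOn.go, List.isPrefixOf, hc']]
        rw [ih _ _ _ (by simp at hf ⊢; omega)]
        rw [pvSplit_cons_ne d c rest hc]
        cases h : pvSplit d rest with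
        | nil => exact absurd h (pvSplit_ne_nil d rest)
        | cons x xs => simp [pvMapHead, h]

theorem pv_splitOn_eq (d : Char) (l : List Char) :
    PySem.Chars.splitOn l [d] = pvSplit d l := by
  rw [PySem.Chars.splitOn, pv_go_split d (l.length + 1) l [] [] (by omega)]
  cases h : pvSplit d l with
  | nil => exact absurd h (pvSplit_ne_nil d l)
  | cons x xs => simp [pvMapHead, h]

-- with budget 1, splitOnMax.go produces the piece before the first separator and the raw remainder
theorem pv_go_m0 (sep : List Char) (fuel : Nat) (l cur : List Char) (acc : List (List Char)) :
    PySem.Chars.splitOnMax.go sep fuel 0 l cur acc = ((cur.reverse ++ l) :: acc).reverse := by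
  cases fuel with
  | zero => rfl
  | succ n => cases l with
    | nil => simp [PySem.Chars.splitOnMax.go]
    | cons c rest => simp [PySem.Chars.splitOnMax.go]

theorem pv_go_m1 (d : Char) (fuel : Nat) (l cur : List Char) (acc : List (List Char))
    (hf : l.length < fuel) :
    PySem.Chars.splitOnMax.go [d] fuel 1 l cur acc =
      match pvSplitFirst d l with
      | none => ((cur.reverse ++ l) :: acc).reverse
      | some (p, q) => ((cur.reverse ++ p) :: acc).reverse ++ [q] := by
  induction fuel generalizing l cur acc with
  | zero => omega
  | succ n ih =>
    cases l with
    | nil => simp [PySem.Chars.splitOnMax.go, pvSplitFirst]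
    | cons c rest =>
      by_cases hc : c = d
      · subst hc
        simp [PySem.Chars.splitOnMax.go, List.isPrefixOf, pvSplitFirst, pv_go_m0]
      · have hc' : ¬ d = c := fun h => hc h.symm
        have hrec := ih rest (c :: cur) acc (by simp at hf ⊢; omega)
        simp [PySem.Chars.splitOnMax.go, List.isPrefixOf, hc, hc', hrec, pvSplitFirst]
        cases h : pvSplitFirst d rest with
        | none => simp
        | some pq => simp

theorem pv_splitMax (d : Char) (l : List Char) :
    PySem.Chars.splitMax? l [d] 1 =
      some (match pvSplitFirst d l with
            | none => [l]
            | some (p, q) => [p, q]) := by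
  have h := pv_go_m1 d (l.length + 1) l [] [] (by omega)
  simp [PySem.Chars.splitMax?, PySem.Chars.splitOnMax]
  rw [h]
  cases hs : pvSplitFirst d l with
  | none => simp
  | some pq => simp

theorem pv_isIn_singleton (d : Char) (l : List Char) :
    PySem.Chars.isIn [d] l = true ↔ d ∈ l := by
  rw [PySem.Chars.isIn_iff_infix, List.singleton_infix_iff]

-- A's per-part value (proof-side restatement of A's loop body)
def pvCodes (part : String) : List String :=
  if PySem.Str.isIn "-" part then
    match (PySem.Str.splitMax? part "-" 1).getD [] with
    | [start, stop] =>
      match PySem.Int.ofStr? start, PySem.Int.ofStr? stop with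
      | some s, some e =>
          (PySem.List.pyRange s (e + 1) 1).map (fun i => PySem.Str.zfill (PySem.Int.toStr i) 3)
      | _, _ => [part]
    | _ => []
  else
    match PySem.Int.ofStr? part with
    | some n => [PySem.Str.zfill (PySem.Int.toStr n) 3]
    | none => if part ≠ "" then [part] else []

theorem pv_foldl_eq (parts : List String) (acc : List String) :
    parts.foldl (fun drgs part =>
      if PySem.Str.isIn "-" part then
        match (PySem.Str.splitMax? part "-" 1).getD [] with
        | [start, stop] =>
          match PySem.Int.ofStr? start, PySem.Int.ofStr? stop with
          | some s, some e =>
              drgs ++ (PySem.List.pyRange s (e + 1) 1).map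
                (fun i => PySem.Str.zfill (PySem.Int.toStr i) 3)
          | _, _ => drgs ++ [part]
        | _ => drgs
      else
        match PySem.Int.ofStr? part with
        | some n => drgs ++ [PySem.Str.zfill (PySem.Int.toStr n) 3]
        | none => if part ≠ "" then drgs ++ [part] else drgs) acc
    = acc ++ parts.flatMap pvCodes := by
  induction parts generalizing acc with
  | nil => simp
  | cons part rest ih =>
    simp only [List.foldl_cons, List.flatMap_cons]
    rw [ih]
    have hstep : (if PySem.Str.isIn "-" part then
        match (PySem.Str.splitMax? part "-" 1).getD [] with
        | [start, stop] =>
          match PySem.Int.ofStr? start, PySem.Int.ofStr? stop with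
          | some s, some e =>
              acc ++ (PySem.List.pyRange s (e + 1) 1).map
                (fun i => PySem.Str.zfill (PySem.Int.toStr i) 3)
          | _, _ => acc ++ [part]
        | _ => acc
      else
        match PySem.Int.ofStr? part with
        | some n => acc ++ [PySem.Str.zfill (PySem.Int.toStr n) 3]
        | none => if part ≠ "" then acc ++ [part] else acc) = acc ++ pvCodes part := by
      unfold pvCodes
      by_cases h : PySem.Str.isIn "-" part = true
      · simp only [h, if_true]
        cases (PySem.Str.splitMax? part "-" 1).getD [] with
        | nil => simp
        | cons a l =>
          cases l with
          | nil => simp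
          | cons b l2 =>
            cases l2 with
            | nil =>
              cases ha : PySem.Int.ofStr? a <;> cases hb : PySem.Int.ofStr? b <;> simp [ha, hb]
            | cons c l3 => simp
      · simp only [h, if_false, Bool.false_eq_true]
        cases PySem.Int.ofStr? part with
        | some n => simp
        | none => by_cases hp : part = "" <;> simp [hp]
    rw [hstep, List.append_assoc]

-- per-part agreement: A's pvCodes equals B's pvEmit on the segment's characters
theorem pvCodes_eq_pvEmit (cs : List Char) :
    pvCodes (String.ofList cs) = pvEmit cs := by
  have htl : (String.ofList cs).toList = cs := by simp
  have hofs : ∀ l : List Char, PySem.Int.ofStr? (String.ofList l) = PySem.Int.ofChars? l := by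
    intro l
    simp [PySem.Int.ofStr?]
  have hisIn : PySem.Str.isIn "-" (String.ofList cs) = PySem.Chars.isIn ['-'] cs := by
    rw [PySem.Str.isIn_eq, htl]; rfl
  have hsm : (PySem.Str.splitMax? (String.ofList cs) "-" 1).getD [] =
      (match pvSplitFirst '-' cs with
       | none => [cs]
       | some (p, q) => [p, q]).map String.ofList := by
    have h := pv_splitMax '-' cs
    have h2 := PySem.Str.splitMax?_map (String.ofList cs) "-" 1
    rw [htl, show ("-" : String).toList = ['-'] from rfl, h] at h2
    cases hsp : PySem.Str.splitMax? (String.ofList cs) "-" 1 with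
    | none => rw [hsp] at h2; simp at h2
    | some ps =>
      rw [hsp] at h2
      simp only [Option.map_some, Option.some_inj] at h2
      have : ps = (match pvSplitFirst '-' cs with
          | none => [cs] | some (p, q) => [p, q]).map String.ofList := by
        have := congrArg (List.map String.ofList) h2
        rw [List.map_map] at this
        simpa [Function.comp_def] using this
      simp [hsp, this]
  unfold pvCodes pvEmit
  rw [pvPart_eq]
  cases hs : pvSplitFirst '-' cs with
  | none =>
    have hmem : '-' ∉ cs := (pvSplitFirst_eq_none_iff _ _).mp hs
    have hin : PySem.Str.isIn "-" (String.ofList cs) = false := by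
      rw [hisIn]
      cases h : PySem.Chars.isIn ['-'] cs
      · rfl
      · exact absurd ((pv_isIn_singleton _ _).mp h) hmem
    simp only [hin, Bool.false_eq_true, if_false, hofs]
    cases hn : PySem.Int.ofChars? cs with
    | some n => simp [PySem.List.pyRange_one_singleton]
    | none =>
      by_cases hp : cs = []
      · simp [hp]
      · have : String.ofList cs ≠ "" := by
          intro h
          have := congrArg String.toList h
          simp at this
          exact hp this
        simp [hp, this, List.isEmpty_iff]
  | some pq =>
    obtain ⟨p, q⟩ := pq
    have hmem : '-' ∈ cs := by
      rw [pvSplitFirst_shape '-' cs p q hs]; simp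
    have hin : PySem.Str.isIn "-" (String.ofList cs) = true := by
      rw [hisIn]; exact (pv_isIn_singleton _ _).mpr hmem
    have hne : cs ≠ [] := by rintro rfl; simp at hmem
    simp only [hin, if_true, hsm, hs, List.map_cons, List.map_nil, hofs]
    cases hp2 : PySem.Int.ofChars? p <;> cases hq2 : PySem.Int.ofChars? q <;>
      simp [hp2, hq2, hne, List.isEmpty_iff]

-- ===== VERDICT (by name: the statement is the Claim_ definition above) =====
theorem expand_drg_range_spec : Claim_equal_expand_drg_range := by
  intro drg_range _
  unfold Spec_expand_drg_range expand_drg_range expand_drg_range_alt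
  rw [pv_foldl_eq, pvGo_eq_flatMap, List.nil_append]
  -- both sides flatMap over the comma segments of the space-free string
  set rep := PySem.Str.replace drg_range " " "" with hrep
  have hsplit : PySem.Str.split? rep "," = some ((pvSplit ',' rep.toList).map String.ofList) := by
    have h2 := PySem.Str.split?_map rep ","
    rw [show ("," : String).toList = [','] from rfl] at h2
    rw [PySem.Chars.split?] at h2
    simp only [List.isEmpty_cons, Bool.false_eq_true, if_false, pv_splitOn_eq] at h2
    cases hsp : PySem.Str.split? rep "," with
    | none => rw [hsp] at h2; simp at h2
    | some ps =>
      rw [hsp] at h2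
      simp only [Option.map_some, Option.some_inj] at h2
      have : ps = (pvSplit ',' rep.toList).map String.ofList := by
        have := congrArg (List.map String.ofList) h2
        rw [List.map_map] at this
        simpa [Function.comp_def] using this
      rw [this]
  rw [hsplit]
  simp only [Option.getD_some, List.flatMap_map]
  exact List.flatMap_congr (fun cs _ => pvCodes_eq_pvEmit cs)
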